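-- pv_equiv track=rewrite | github.com/omri-aviram/Light-source-and-object-proximity-detector-system | main.py | _close_mask
-- ===== SOURCE A (Python) =====
-- def _close_mask(mask, max_gap=2):
--     """Morphological closing on boolean mask: fill tiny False runs between True runs."""
--     out = list(mask)
--     n = len(out); i = 0
--     while i < n:
--         if out[i]:
--             i += 1; continue
--         j = i
--         while j < n and not out[j]:
--             j += 1
--         left_true  = (i - 1 >= 0 and out[i - 1])
--         right_true = (j < n and out[j])
--         if left_true and right_true and (j - i) <= max_gap:
--             for k in range(i, j):
--                 out[k] = True
--         i = j
--     return out
-- ===== SOURCE B (Python) =====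
-- def _close_mask(mask, max_gap=2):
--     """Morphological closing on boolean mask: fill tiny False runs between True runs."""
--     out = list(mask)
--     trues = [i for i, v in enumerate(out) if v]
--     for p, q in zip(trues, trues[1:]):
--         if q - p - 1 <= max_gap:
--             for k in range(p + 1, q):
--                 out[k] = True
--     return out
-- ===== Notes on version B (the rewrite author's own statement) =====
-- stated objective: simpler
-- what changed: B precomputes the index list of True elements once and fills the interior of each consecutive True pair whose gap is at most max_gap, replacing A's cursor-driven while-loop scan over False runs with its explicit left/right boundary tests.
import Mathlib
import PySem

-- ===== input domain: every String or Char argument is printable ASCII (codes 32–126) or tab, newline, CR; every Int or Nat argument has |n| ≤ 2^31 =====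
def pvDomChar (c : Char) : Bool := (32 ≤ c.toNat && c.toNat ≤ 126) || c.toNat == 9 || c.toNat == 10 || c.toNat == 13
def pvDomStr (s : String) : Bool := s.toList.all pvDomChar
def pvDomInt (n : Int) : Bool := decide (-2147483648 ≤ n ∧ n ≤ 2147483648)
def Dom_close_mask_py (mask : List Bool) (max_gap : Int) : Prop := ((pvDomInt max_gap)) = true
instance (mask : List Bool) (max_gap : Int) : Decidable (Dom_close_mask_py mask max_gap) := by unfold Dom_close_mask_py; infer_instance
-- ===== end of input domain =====

-- B rebuilds the closing from the precomputed list of True indices (filling each small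
-- interior gap between consecutive True positions) instead of A's cursor-driven scan
-- over False runs; objective: simpler.

-- ===== PORT A =====
-- inner `while j < n and not out[j]: j += 1` (started at j = i; A enters it with out[i] False)
def pvFindTrue (out : List Bool) (j : Nat) : Nat :=
  if h : j < out.length then
    if out[j] then j else pvFindTrue out (j + 1)
  else j
termination_by out.length - j

-- `for k in range(i, j): out[k] = True`
def pvFillA (out : List Bool) (i j : Nat) : List Bool :=
  if i < j then pvFillA (out.set i true) (i + 1) j else out
termination_by j - i

theorem pvFillA_length (out : List Bool) (i j : Nat) : (pvFillA out i j).length = out.length := by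
  fun_induction pvFillA with
  | case1 o a h ih => rw [ih, List.length_set]
  | case2 => rfl

theorem pvFindTrue_gt (out : List Bool) (i : Nat) (h : i < out.length) (hf : out[i] = false) :
    i < pvFindTrue out i := by
  unfold pvFindTrue
  rw [dif_pos h, hf]
  simp only [Bool.false_eq_true, if_false]
  have : ∀ j, j ≤ pvFindTrue out j := by
    intro j
    fun_induction pvFindTrue out j with
    | case1 j h hj => omega
    | case2 j h hj ih => omega
    | case3 j h => omega
  have := this (i + 1)
  omega

-- the main `while i < n` loop of A; `g` is max_gap
def pvLoopA (g : Int) (out : List Bool) (i : Nat) : List Bool :=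
  if h : i < out.length then
    if out[i] then pvLoopA g out (i + 1)
    else
      let j := pvFindTrue out i
      let left_true : Bool := decide (1 ≤ i) && out.getD (i - 1) false
      let right_true : Bool := decide (j < out.length) && out.getD j false
      let out' := if left_true && right_true && decide ((j : Int) - (i : Int) ≤ g)
                  then pvFillA out i j else out
      pvLoopA g out' j
  else out
termination_by out.length - i
decreasing_by
  · omega
  · have hj : i < pvFindTrue out i := pvFindTrue_gt out i h (by simpa using ‹¬out[i] = true›)
    split
    · simp only [pvFillA_length]; omega
    · omega

def close_mask_py (mask : List Bool) (max_gap : Int) : List Bool :=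
  pvLoopA max_gap mask 0

-- ===== PORT B =====
-- `[i for i, v in enumerate(out) if v]` (structural recursion over the list)
def pvTrues : List Bool → List Nat
  | [] => []
  | b :: t => if b then 0 :: (pvTrues t).map (· + 1) else (pvTrues t).map (· + 1)

-- `for k in range(p + 1, q): out[k] = True`
def pvFillB (o : List Bool) (i j : Nat) : List Bool :=
  if i < j then pvFillB (o.set i true) (i + 1) j else o
termination_by j - i

-- body of `for p, q in zip(trues, trues[1:])`
def pvFillGap (g : Int) (o : List Bool) (pq : Nat × Nat) : List Bool :=
  if (pq.2 : Int) - (pq.1 : Int) - 1 ≤ g then pvFillB o (pq.1 + 1) pq.2 else o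

def close_mask_py_alt (mask : List Bool) (max_gap : Int) : List Bool :=
  let out := mask
  let trues := pvTrues out
  (trues.zip trues.tail).foldl (pvFillGap max_gap) out

-- ===== PRECONDITION & SPEC =====
def Spec_close_mask_py (mask : List Bool) (max_gap : Int) (out : List Bool) : Prop := out = close_mask_py_alt mask max_gap
instance (mask : List Bool) (max_gap : Int) (out : List Bool) : Decidable (Spec_close_mask_py mask max_gap out) := by unfold Spec_close_mask_py; infer_instance

-- ===== CLAIM (what is proved, stated in full; the proofs are below) =====
def Claim_equal_close_mask_py : Prop := ∀ (mask : List Bool) (max_gap : Int), Dom_close_mask_py mask max_gap → Spec_close_mask_py mask max_gap (close_mask_py mask max_gap)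

-- ===== LEMMAS AND PROOFS =====

-- canonical form both ports are reduced to: process the mask one run at a time;
-- `prev` says whether the element just before the current suffix is True
def fillFrom (g : Int) : Bool → List Bool → List Bool
  | _, [] => []
  | _, true :: t => true :: fillFrom g true t
  | prev, false :: t =>
      let zs := t.takeWhile (fun b => !b)
      let rest := t.dropWhile (fun b => !b)
      if prev = true ∧ rest ≠ [] ∧ ((1 + zs.length : Int) ≤ g) then
        List.replicate (1 + zs.length) true ++ fillFrom g true rest
      else
        false :: zs ++ fillFrom g true rest
termination_by _ l => l.length
decreasing_by
  all_goals simp only [List.length_cons]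
  · omega
  all_goals (have := List.length_dropWhile_le (fun b : Bool => !b) t; omega)

theorem fillFrom_nil (g : Int) (b : Bool) : fillFrom g b [] = [] := by
  conv_lhs => unfold fillFrom

theorem fillFrom_true_cons (g : Int) (b : Bool) (t : List Bool) :
    fillFrom g b (true :: t) = true :: fillFrom g true t := by
  conv_lhs => unfold fillFrom

theorem fillFrom_false_cons (g : Int) (b : Bool) (t : List Bool) :
    fillFrom g b (false :: t) =
      if b = true ∧ t.dropWhile (fun b => !b) ≠ [] ∧ ((1 + (t.takeWhile (fun b => !b)).length : Int) ≤ g) then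
        List.replicate (1 + (t.takeWhile (fun b => !b)).length) true ++ fillFrom g true (t.dropWhile (fun b => !b))
      else
        false :: t.takeWhile (fun b => !b) ++ fillFrom g true (t.dropWhile (fun b => !b)) := by
  conv_lhs => unfold fillFrom

theorem fillFrom_all_false (g : Int) (b : Bool) (l : List Bool) (h : ∀ x ∈ l, x = false) :
    fillFrom g b l = l := by
  cases l with
  | nil => exact fillFrom_nil g b
  | cons x t =>
    have hx : x = false := h x List.mem_cons_self
    subst hx
    rw [fillFrom_false_cons]
    have ht : t.takeWhile (fun b => !b) = t := by
      apply List.takeWhile_eq_self_iff.mpr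
      intro y hy; simp [h y (List.mem_cons_of_mem _ hy)]
    have hd : t.dropWhile (fun b => !b) = [] := by
      apply List.dropWhile_eq_nil_iff.mpr
      intro y hy; simp [h y (List.mem_cons_of_mem _ hy)]
    simp [ht, hd, fillFrom_nil]

theorem pvFindTrue_eq (out : List Bool) (i : Nat) :
    pvFindTrue out i = i + ((out.drop i).takeWhile (fun b => !b)).length := by
  fun_induction pvFindTrue with
  | case1 j h hj =>
    have hd : out.drop j = true :: out.drop (j + 1) := by
      rw [List.drop_eq_getElem_cons h, hj]
    simp [hd]
  | case2 j h hj ih =>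
    have hd : out.drop j = false :: out.drop (j + 1) := by
      rw [List.drop_eq_getElem_cons h]
      simp at hj; rw [hj]
    rw [ih, hd]
    simp; omega
  | case3 j h =>
    have : out.drop j = [] := List.drop_eq_nil_of_le (by omega)
    simp [this]

theorem pvFillA_decomp (out : List Bool) (i j : Nat) :
    i ≤ j → j ≤ out.length →
    pvFillA out i j = out.take i ++ List.replicate (j - i) true ++ out.drop j := by
  fun_induction pvFillA with
  | case1 o a h ih =>
    intro hij hj
    have ha : a < o.length := by omega
    rw [ih (by omega) (by simpa using hj)]
    have h1 : (o.set a true).take (a + 1) = o.take a ++ [true] := by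
      rw [List.take_set, List.take_succ, List.getElem?_eq_getElem ha, List.set_append]
      simp [List.length_take, Nat.min_eq_left (Nat.le_of_lt ha)]
    have h2 : (o.set a true).drop j = o.drop j := by
      rw [List.drop_set, if_pos h]
    rw [h1, h2]
    have h4 : j - a = (j - a - 1) + 1 := by omega
    rw [h4, List.replicate_succ]
    simp
    omega
  | case2 o a h =>
    intro hij hj
    have : a = j := by omega
    subst this
    simp

theorem pvFillB_eq_pvFillA (o : List Bool) (i j : Nat) : pvFillB o i j = pvFillA o i j := by
  fun_induction pvFillB with
  | case1 o a h ih =>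
    conv_rhs => rw [pvFillA]
    rw [if_pos h, ih]
  | case2 o a h =>
    conv_rhs => rw [pvFillA]
    rw [if_neg h]


theorem pvTrues_all_false (l : List Bool) (h : ∀ x ∈ l, x = false) : pvTrues l = [] := by
  induction l with
  | nil => rfl
  | cons x t ih =>
    have hx : x = false := h x List.mem_cons_self
    subst hx
    simp [pvTrues, ih (fun y hy => h y (List.mem_cons_of_mem _ hy))]

theorem pvTrues_append (zs r : List Bool) (h : ∀ x ∈ zs, x = false) :
    pvTrues (zs ++ true :: r) = zs.length :: (pvTrues r).map (· + (zs.length + 1)) := by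
  induction zs with
  | nil => simp [pvTrues]
  | cons z zs' ih =>
    have hz : z = false := h z List.mem_cons_self
    subst hz
    have ih' := ih (fun y hy => h y (List.mem_cons_of_mem _ hy))
    simp only [List.cons_append, pvTrues, Bool.false_eq_true, if_false, ih', List.map_cons,
      List.map_map, List.length_cons]
    congr 1

theorem takeWhile_false_append (zs r : List Bool) (h : ∀ x ∈ zs, x = false) :
    (zs ++ true :: r).takeWhile (fun b => !b) = zs := by
  induction zs with
  | nil => simp
  | cons z zs' ih =>
    have hz : z = false := h z List.mem_cons_self
    subst hz
    simp [ih (fun y hy => h y (List.mem_cons_of_mem _ hy))]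

theorem dropWhile_false_append (zs r : List Bool) (h : ∀ x ∈ zs, x = false) :
    (zs ++ true :: r).dropWhile (fun b => !b) = true :: r := by
  induction zs with
  | nil => simp
  | cons z zs' ih =>
    have hz : z = false := h z List.mem_cons_self
    subst hz
    simp [ih (fun y hy => h y (List.mem_cons_of_mem _ hy))]

theorem getD_false_of_all_false (l : List Bool) (k : Nat) (h : ∀ x ∈ l, x = false) :
    l.getD k false = false := by
  rw [List.getD_eq_getElem?_getD]
  cases hk : l[k]? with
  | none => rfl
  | some x => simpa using h x (List.mem_of_getElem? hk)


theorem dropWhile_head_false {α : Type} {p : α → Bool} {l : List α} {b : α} {r : List α}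
    (h : l.dropWhile p = b :: r) : p b = false := by
  induction l with
  | nil => simp at h
  | cons x t ih =>
    rw [List.dropWhile_cons] at h
    by_cases hx : p x = true
    · rw [if_pos hx] at h
      exact ih h
    · rw [if_neg hx] at h
      cases h
      simpa using hx

theorem loopA_eq (g : Int) (n : Nat) :
    ∀ (out : List Bool) (i : Nat), out.length - i ≤ n →
    pvLoopA g out i =
      out.take i ++ fillFrom g (decide (1 ≤ i) && out.getD (i - 1) false) (out.drop i) := by
  induction n with
  | zero =>
    intro out i hn
    rw [pvLoopA, dif_neg (by omega)]
    rw [List.take_of_length_le (by omega), List.drop_eq_nil_of_le (by omega), fillFrom_nil]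
    simp
  | succ n ih =>
    intro out i hn
    by_cases h : i < out.length
    · rw [pvLoopA, dif_pos h]
      by_cases hi : out[i] = true
      · rw [if_pos hi, ih out (i + 1) (by omega)]
        have hd : out.drop i = true :: out.drop (i + 1) := by
          rw [List.drop_eq_getElem_cons h, hi]
        have hp : (decide (1 ≤ i + 1) && out.getD (i + 1 - 1) false) = true := by
          simp [List.getD_eq_getElem?_getD, List.getElem?_eq_getElem h, hi]
        rw [hp, hd, fillFrom_true_cons]
        rw [List.take_succ, List.getElem?_eq_getElem h, hi]
        simp
      · rw [if_neg hi]
        dsimp only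
        have hib : out[i] = false := by simpa using hi
        have hdi : out.drop i = false :: out.drop (i + 1) := by
          rw [List.drop_eq_getElem_cons h, hib]
        have htzr : ((out.drop (i + 1)).takeWhile (fun b => !b)) ++ ((out.drop (i + 1)).dropWhile (fun b => !b)) = out.drop (i + 1) :=
          List.takeWhile_append_dropWhile
        have hlen : ((out.drop (i + 1)).takeWhile (fun b => !b)).length + ((out.drop (i + 1)).dropWhile (fun b => !b)).length = (out.drop (i + 1)).length := by
          rw [← List.length_append, htzr]
        have htlen : (out.drop (i + 1)).length = out.length - (i + 1) := by simp
        set t := out.drop (i + 1) with ht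
        set zs := t.takeWhile (fun b => !b) with hzs
        set rest := t.dropWhile (fun b => !b) with hrest
        have hzf : ∀ x ∈ zs, x = false := by
          intro x hx
          have := List.mem_takeWhile_imp (hzs ▸ hx)
          simpa using this
        have hj : pvFindTrue out i = i + 1 + zs.length := by
          rw [pvFindTrue_eq, hdi]
          simp only [List.takeWhile_cons, Bool.not_false, if_pos rfl]
          simp [hzs]
          omega
        have hjle : i + 1 + zs.length ≤ out.length := by omega
        have hdrop : out.drop (i + 1 + zs.length) = rest := by
          have h1 : out.drop (i + 1 + zs.length) = t.drop zs.length := by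
            rw [ht, List.drop_drop]
          rw [h1, ← htzr, List.drop_left' rfl]
        rw [hj]
        cases hr : rest with
        | nil =>
          -- the False run reaches the end of the list: no fill, loop exits at j = n
          have hzt : zs = t := by rw [← htzr, hr, List.append_nil]
          have hjlen : i + 1 + zs.length = out.length := by
            rw [hr] at hlen; simp at hlen; omega
          have hcond : ((decide (1 ≤ i) && out.getD (i - 1) false) &&
              (decide (i + 1 + zs.length < out.length) && out.getD (i + 1 + zs.length) false) &&
              decide ((↑(i + 1 + zs.length) : Int) - (↑i : Int) ≤ g)) = false := by
            simp [hjlen]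
          rw [if_neg (by rw [hcond]; simp)]
          rw [ih out (i + 1 + zs.length) (by omega)]
          rw [List.take_of_length_le (by omega), List.drop_eq_nil_of_le (by omega), fillFrom_nil,
            List.append_nil]
          have : fillFrom g (decide (1 ≤ i) && out.getD (i - 1) false) (false :: t) = false :: t := by
            apply fillFrom_all_false
            intro x hx
            rcases List.mem_cons.mp hx with hx | hx
            · exact hx
            · exact hzf x (by rw [hzt]; exact hx)
          rw [hdi, this, ← hdi, List.take_append_drop]
        | cons b r =>
          have hb : b = true := by
            have : (fun b : Bool => !b) b = false :=
              dropWhile_head_false (p := fun b : Bool => !b) (l := t) (by rw [← hrest, hr])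
            simpa using this
          subst hb
          have hjlt : i + 1 + zs.length < out.length := by
            have : rest.length = out.length - (i + 1 + zs.length) := by
              rw [← hdrop]; simp
            rw [hr] at this; simp at this; omega
          have hgd : out.getD (i + 1 + zs.length) false = true := by
            rw [List.getD_eq_getElem?_getD, ← List.head?_drop, hdrop, hr]
            rfl
          have hgd' : out[i + 1 + zs.length] = true := by
            rwa [List.getD_eq_getElem?_getD, List.getElem?_eq_getElem hjlt, Option.getD_some] at hgd
          have hrtB : (decide (i + 1 + zs.length < out.length) && out.getD (i + 1 + zs.length) false) = true := by
            simp [hjlt, hgd']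
          rw [hrtB]
          have hint : ((↑(i + 1 + zs.length) : Int) - (↑i : Int)) = 1 + (zs.length : Int) := by
            push_cast; ring
          by_cases hc : (decide (1 ≤ i) && out.getD (i - 1) false) = true ∧ ((1 + (zs.length : Int)) ≤ g)
          · have hcond : ((decide (1 ≤ i) && out.getD (i - 1) false) && true &&
                decide ((↑(i + 1 + zs.length) : Int) - (↑i : Int) ≤ g)) = true := by
              rw [hint, hc.1]; simp [hc.2]
            rw [if_pos hcond]
            have hfill : pvFillA out i (i + 1 + zs.length) =
                (out.take i ++ List.replicate (1 + zs.length) true) ++ rest := by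
              rw [pvFillA_decomp out i (i + 1 + zs.length) (by omega) hjle, hdrop]
              have : i + 1 + zs.length - i = 1 + zs.length := by omega
              rw [this, List.append_assoc]
            rw [hfill]
            have hl1 : (out.take i ++ List.replicate (1 + zs.length) true).length = i + 1 + zs.length := by
              simp [List.length_take, Nat.min_eq_left (Nat.le_of_lt h)]
              omega
            rw [ih _ (i + 1 + zs.length) (by simp only [List.length_append, hl1]; omega)]
            rw [List.take_left' hl1, List.drop_left' hl1]
            have htki : (out.take i).length = i := by
              simp [List.length_take, Nat.min_eq_left (Nat.le_of_lt h)]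
            have hprev : ((out.take i ++ List.replicate (1 + zs.length) true) ++ rest).getD (i + zs.length) false = true := by
              rw [List.getD_append _ _ _ _ (by rw [hl1]; omega)]
              rw [List.getD_append_right _ _ _ _ (by rw [htki]; omega)]
              rw [htki, List.getD_eq_getElem?_getD, List.getElem?_replicate]
              have hidx : i + zs.length - i = zs.length := by omega
              rw [hidx, if_pos (by omega)]
              rfl
            have : i + 1 + zs.length - 1 = i + zs.length := by omega
            rw [this, hprev]
            rw [hr]
            rw [hdi]
            rw [fillFrom_false_cons]
            rw [if_pos ⟨hc.1, by rw [← hrest, hr]; simp, hc.2⟩]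
            rw [← hrest, hr]
            simp only [List.append_assoc, List.cons_append, List.nil_append]
            rw [← hzs, fillFrom_true_cons, fillFrom_true_cons]
          · have hcond : ((decide (1 ≤ i) && out.getD (i - 1) false) && true &&
                decide ((↑(i + 1 + zs.length) : Int) - (↑i : Int) ≤ g)) = false := by
              rw [hint]
              cases hA : (decide (1 ≤ i) && out.getD (i - 1) false) with
              | false => simp [hA]
              | true =>
                have hg : ¬ ((1 + (zs.length : Int)) ≤ g) := fun hg => hc ⟨hA, hg⟩
                simp [hg]
            rw [if_neg (by rw [hcond]; simp)]
            rw [ih out (i + 1 + zs.length) (by omega)]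
            have hprev : out.getD (i + zs.length) false = false := by
              rw [List.getD_eq_getElem?_getD, ← List.getElem?_drop (i := i) (j := zs.length), hdi,
                ← htzr, ← List.cons_append, ← List.getD_eq_getElem?_getD,
                List.getD_append _ _ _ _ (by simp)]
              refine getD_false_of_all_false _ _ (fun x hx => ?_)
              rcases List.mem_cons.mp hx with h1 | h1
              · exact h1
              · exact hzf x h1
            have e1 : i + 1 + zs.length - 1 = i + zs.length := by omega
            rw [e1, hprev, Bool.and_false]
            rw [hdrop, hr, fillFrom_true_cons]
            have htake : out.take (i + 1 + zs.length) = out.take i ++ false :: zs := by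
              have e2 : i + 1 + zs.length = i + (1 + zs.length) := by omega
              have e3 : 1 + zs.length = zs.length + 1 := by omega
              rw [e2, List.take_add, hdi, ← htzr, e3, List.take_succ_cons, List.take_left]
            rw [htake, hdi, fillFrom_false_cons]
            rw [if_neg (fun hx => hc ⟨hx.1, hx.2.2⟩)]
            rw [← hzs, ← hrest, hr, fillFrom_true_cons]
            simp
    · rw [pvLoopA, dif_neg h]
      rw [List.take_of_length_le (by omega), List.drop_eq_nil_of_le (by omega), fillFrom_nil]
      simp


theorem foldl_fill_eq (g : Int) (n : Nat) :
    ∀ (o : List Bool) (p : Nat), o.length - p ≤ n → p + 1 ≤ o.length →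
    ((p :: (pvTrues (o.drop (p + 1))).map (· + (p + 1))).zip
        ((pvTrues (o.drop (p + 1))).map (· + (p + 1)))).foldl (pvFillGap g) o
      = o.take (p + 1) ++ fillFrom g true (o.drop (p + 1)) := by
  induction n with
  | zero => intro o p hn hp; omega
  | succ n ih =>
    intro o p hn hp
    have htzr : ((o.drop (p + 1)).takeWhile (fun b => !b)) ++ ((o.drop (p + 1)).dropWhile (fun b => !b)) = o.drop (p + 1) :=
      List.takeWhile_append_dropWhile
    have hlen : ((o.drop (p + 1)).takeWhile (fun b => !b)).length + ((o.drop (p + 1)).dropWhile (fun b => !b)).length = (o.drop (p + 1)).length := by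
      rw [← List.length_append, htzr]
    have htlen : (o.drop (p + 1)).length = o.length - (p + 1) := by simp
    set t := o.drop (p + 1) with ht
    set zs := t.takeWhile (fun b => !b) with hzs
    set rest := t.dropWhile (fun b => !b) with hrest
    have hzf : ∀ x ∈ zs, x = false := by
      intro x hx
      have := List.mem_takeWhile_imp (hzs ▸ hx)
      simpa using this
    clear_value t zs rest
    cases hr : rest with
    | nil =>
      have hallt : ∀ x ∈ t, x = false := by
        intro x hx
        have := List.dropWhile_eq_nil_iff.mp (by rw [← hrest, hr]) x hx
        simpa using this
      rw [pvTrues_all_false t hallt]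
      simp only [List.map_nil, List.zip_nil_right, List.foldl_nil]
      rw [fillFrom_all_false g true t hallt, ht, List.take_append_drop]
    | cons b r =>
      have hb : b = true := by
        have : (fun b : Bool => !b) b = false :=
          dropWhile_head_false (p := fun b : Bool => !b) (l := t) (by rw [← hrest, hr])
        simpa using this
      subst hb
      have hteq : t = zs ++ true :: r := by rw [← htzr, hr]
      have hTr : pvTrues t = zs.length :: (pvTrues r).map (· + (zs.length + 1)) := by
        rw [hteq]; exact pvTrues_append zs r hzf
      have hmap : (pvTrues t).map (· + (p + 1)) =
          (p + 1 + zs.length) :: (pvTrues r).map (· + (p + 1 + zs.length + 1)) := by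
        rw [hTr, List.map_cons, List.map_map]
        refine List.cons_eq_cons.mpr ⟨by omega, ?_⟩
        apply List.map_congr_left
        intro a _
        simp
        omega
      rw [hmap, List.zip_cons_cons, List.foldl_cons]
      have hqlt : p + 1 + zs.length < o.length := by
        rw [hteq] at htlen; simp at htlen; omega
      have hdq : o.drop (p + 1 + zs.length) = true :: r := by
        have h1 : o.drop (p + 1 + zs.length) = t.drop zs.length := by rw [ht, List.drop_drop]
        rw [h1, hteq, List.drop_left' rfl]
      have hdq1 : o.drop (p + 1 + zs.length + 1) = r := by
        have h1 : o.drop (p + 1 + zs.length + 1) = t.drop (zs.length + 1) := by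
          rw [ht, List.drop_drop]; congr 1
        have h2 : zs ++ true :: r = (zs ++ [true]) ++ r := by simp
        rw [h1, hteq, h2, List.drop_left' (by simp)]
      have hint : ((p + 1 + zs.length : Nat) : Int) - (p : Int) - 1 = (zs.length : Int) := by
        push_cast; ring
      have hto : zs.length + 1 + r.length = o.length - (p + 1) := by
        rw [hteq] at htlen; simp at htlen; omega
      simp only [pvFillGap, hint]
      by_cases hc : ((zs.length : Int) ≤ g)
      · rw [if_pos hc]
        have ho1 : pvFillB o (p + 1) (p + 1 + zs.length) =
            (o.take (p + 1) ++ List.replicate zs.length true ++ [true]) ++ r := by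
          rw [pvFillB_eq_pvFillA, pvFillA_decomp o (p + 1) (p + 1 + zs.length) (by omega) (by omega),
            hdq]
          have e : p + 1 + zs.length - (p + 1) = zs.length := by omega
          rw [e]
          simp
        rw [ho1]
        have hL1 : (o.take (p + 1) ++ List.replicate zs.length true ++ [true]).length
            = p + 1 + zs.length + 1 := by
          simp [List.length_take]
          omega
        have hih := ih ((o.take (p + 1) ++ List.replicate zs.length true ++ [true]) ++ r)
          (p + 1 + zs.length)
          (by rw [List.length_append, hL1]; omega)
          (by rw [List.length_append, hL1]; omega)
        rw [List.drop_left' hL1, List.take_left' hL1] at hih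
        rw [hih, hteq]
        cases zs with
        | nil =>
          simp [fillFrom_true_cons]
        | cons z zs' =>
          have hz : z = false := hzf z List.mem_cons_self
          subst hz
          have hzf' : ∀ x ∈ zs', x = false := fun x hx => hzf x (List.mem_cons_of_mem _ hx)
          simp only [List.cons_append, List.length_cons]
          rw [fillFrom_false_cons,
            takeWhile_false_append zs' r hzf', dropWhile_false_append zs' r hzf']
          rw [if_pos ⟨rfl, by simp, by simp only [List.length_cons] at hc; push_cast at hc ⊢; omega⟩]
          rw [fillFrom_true_cons]
          have e : 1 + zs'.length = zs'.length + 1 := by omega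
          rw [e]
          simp [List.replicate_succ']
      · rw [if_neg hc]
        have hih := ih o (p + 1 + zs.length) (by omega) (by omega)
        rw [hdq1] at hih
        rw [hih]
        have htake : o.take (p + 1 + zs.length + 1) = o.take (p + 1) ++ (zs ++ [true]) := by
          have e : p + 1 + zs.length + 1 = (p + 1) + (zs.length + 1) := by omega
          rw [e, List.take_add, ← ht, hteq]
          have h2 : zs ++ true :: r = (zs ++ [true]) ++ r := by simp
          rw [h2, List.take_left' (by simp)]
        rw [htake, hteq]
        cases zs with
        | nil =>
          simp [fillFrom_true_cons]
        | cons z zs' =>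
          have hz : z = false := hzf z List.mem_cons_self
          subst hz
          have hzf' : ∀ x ∈ zs', x = false := fun x hx => hzf x (List.mem_cons_of_mem _ hx)
          simp only [List.cons_append, List.length_cons] at hc ⊢
          rw [fillFrom_false_cons,
            takeWhile_false_append zs' r hzf', dropWhile_false_append zs' r hzf']
          rw [if_neg (fun hx => hc (by have := hx.2.2; push_cast at this ⊢; omega))]
          rw [fillFrom_true_cons]
          simp
theorem alt_eq_aux (g : Int) (zs r : List Bool) (h : ∀ x ∈ zs, x = false) :
    close_mask_py_alt (zs ++ true :: r) g = fillFrom g false (zs ++ true :: r) := by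
  unfold close_mask_py_alt
  dsimp only
  rw [pvTrues_append zs r h]
  have hdrop : (zs ++ true :: r).drop (zs.length + 1) = r := by
    have h2 : zs ++ true :: r = (zs ++ [true]) ++ r := by simp
    rw [h2, List.drop_left' (by simp)]
  have hfold := foldl_fill_eq g (zs ++ true :: r).length (zs ++ true :: r) zs.length
    (by omega) (by simp)
  rw [hdrop] at hfold
  rw [List.tail_cons, hfold]
  have htake : (zs ++ true :: r).take (zs.length + 1) = zs ++ [true] := by
    have h2 : zs ++ true :: r = (zs ++ [true]) ++ r := by simp
    rw [h2, List.take_left' (by simp)]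
  rw [htake]
  cases zs with
  | nil => simp [fillFrom_true_cons]
  | cons z zs' =>
    have hz : z = false := h z List.mem_cons_self
    subst hz
    have hzf' : ∀ x ∈ zs', x = false := fun x hx => h x (List.mem_cons_of_mem _ hx)
    simp only [List.cons_append]
    rw [fillFrom_false_cons, takeWhile_false_append zs' r hzf', dropWhile_false_append zs' r hzf']
    rw [if_neg (by simp)]
    rw [fillFrom_true_cons]
    simp

theorem alt_eq (g : Int) (mask : List Bool) :
    close_mask_py_alt mask g = fillFrom g false mask := by
  cases hr : mask.dropWhile (fun b => !b) with
  | nil =>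
    have hall : ∀ x ∈ mask, x = false := by
      intro x hx
      have := List.dropWhile_eq_nil_iff.mp hr x hx
      simpa using this
    unfold close_mask_py_alt
    dsimp only
    rw [pvTrues_all_false mask hall]
    simp only [List.tail_nil, List.zip_nil_right, List.foldl_nil]
    rw [fillFrom_all_false g false mask hall]
  | cons b r =>
    have hb : b = true := by
      have : (fun b : Bool => !b) b = false :=
        dropWhile_head_false (p := fun b : Bool => !b) (l := mask) hr
      simpa using this
    subst hb
    have hm : mask = mask.takeWhile (fun b => !b) ++ true :: r := by
      conv_lhs => rw [← List.takeWhile_append_dropWhile (p := fun b : Bool => !b) (l := mask)]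
      rw [hr]
    rw [hm]
    exact alt_eq_aux g _ r (fun x hx => by
      have := List.mem_takeWhile_imp hx
      simpa using this)

-- ===== VERDICT (by name: the statement is the Claim_ definition above) =====
theorem close_mask_py_spec : Claim_equal_close_mask_py := by
  intro mask g _
  unfold Spec_close_mask_py close_mask_py
  rw [loopA_eq g mask.length mask 0 (by omega), alt_eq]
  simp
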